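-- pv_equiv track=rewrite | github.com/haminthecoder/leetcode_solution | medium/flipCoinAlternate.py | solution
-- ===== SOURCE A (Python) =====
-- def solution(A):
--     # write your code in Python 3.6
--     if len(A) == 0 or len(A) == 1:
--         return 0
--
--     def flip(N):
--         if N == 1:
--             N = 0
--         else:
--             N = 1
--         return N
--
--     def count_flip(arr, prev):
--         count = 0
--         while arr:
--             curr = arr.pop(0)
--             if prev == curr:
--                 count += 1
--                 curr = flip(curr)
--             prev = curr
--         return count
--
--     if len(A) == 0 or len(A) == 1:
--         return A
--
--     copy = A.copy()
--     prev = copy.pop(0)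
--     # Num flips when first index = A[0]
--     count = count_flip(copy,prev)
--
--     # Num flips when first index = flip(A[0])
--     prev = flip(A.pop(0))
--     rev_count = 1 + count_flip(A, prev)
--
--     return min(count,rev_count)
-- ===== SOURCE B (Python) =====
-- def solution(A):
--     # Single O(n) index pass tracking both starting parities at once
--     # (A's version pops from the front, O(n^2), and empties its argument;
--     # B does not mutate A — return values agree).
--     if len(A) < 2:
--         return 0
--     p1, c1 = A[0], 0
--     p2, c2 = (0 if A[0] == 1 else 1), 1
--     for i in range(1, len(A)):
--         x = A[i]
--         if p1 == x:
--             c1 += 1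
--             p1 = 0 if x == 1 else 1
--         else:
--             p1 = x
--         if p2 == x:
--             c2 += 1
--             p2 = 0 if x == 1 else 1
--         else:
--             p2 = x
--     return min(c1, c2)
-- ===== Notes on version B (the rewrite author's own statement) =====
-- stated objective: faster
-- what changed: Replaces the two destructive pop(0) passes (each pop is O(n)) with one index-based pass that tracks both starting parities simultaneously, without mutating the input.
import Mathlib
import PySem

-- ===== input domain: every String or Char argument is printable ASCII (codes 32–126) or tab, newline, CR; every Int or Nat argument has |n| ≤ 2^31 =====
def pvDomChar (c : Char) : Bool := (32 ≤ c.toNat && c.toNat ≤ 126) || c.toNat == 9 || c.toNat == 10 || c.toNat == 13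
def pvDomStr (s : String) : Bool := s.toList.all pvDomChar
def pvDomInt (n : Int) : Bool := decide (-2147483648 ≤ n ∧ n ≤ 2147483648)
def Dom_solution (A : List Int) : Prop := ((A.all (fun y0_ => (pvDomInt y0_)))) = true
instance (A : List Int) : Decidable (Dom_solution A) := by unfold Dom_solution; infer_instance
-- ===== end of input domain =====

-- B replaces A's two destructive pop(0) passes with one index pass tracking both
-- starting parities at once (A empties its argument list; equivalence is about the
-- return value only — B does not mutate).

-- ===== PORT A =====
def pvFlip (n : Int) : Int := if n == 1 then 0 else 1

-- A's count_flip: pops from the front, counting and flipping on equality with prev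
def pvCountFlip : List Int → Int → Int
  | [], _ => 0
  | c :: rest, prev => if prev == c then 1 + pvCountFlip rest (pvFlip c) else pvCountFlip rest c

def solution (A : List Int) : Int :=
  match A with
  | [] => 0
  | [_] => 0
  | a :: rest => min (pvCountFlip rest a) (1 + pvCountFlip rest (pvFlip a))

-- ===== PORT B =====
-- one step of B's loop on one (prev, count) track
def pvStep (s : Int × Int) (x : Int) : Int × Int :=
  if s.1 == x then ((if x == 1 then 0 else 1), s.2 + 1) else (x, s.2)

def solution_alt (A : List Int) : Int :=
  if A.length < 2 then 0
  else
    let a := A.headD 0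
    let init : (Int × Int) × (Int × Int) := ((a, 0), ((if a == 1 then 0 else 1), 1))
    let r := A.tail.foldl (fun s x => (pvStep s.1 x, pvStep s.2 x)) init
    min r.1.2 r.2.2

-- ===== PRECONDITION & SPEC =====
def Spec_solution (A : List Int) (out : Int) : Prop := out = solution_alt A
instance (A : List Int) (out : Int) : Decidable (Spec_solution A out) := by unfold Spec_solution; infer_instance

-- ===== CLAIM (what is proved, stated in full; the proofs are below) =====
def Claim_equal_solution : Prop := ∀ (A : List Int), Dom_solution A → Spec_solution A (solution A)

-- ===== LEMMAS AND PROOFS =====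

-- the fused fold is the pair of the two single-track folds
theorem foldl_pair (l : List Int) (s t : Int × Int) :
    l.foldl (fun s x => (pvStep s.1 x, pvStep s.2 x)) (s, t)
      = (l.foldl pvStep s, l.foldl pvStep t) := by
  induction l generalizing s t with
  | nil => rfl
  | cons x xs ih => simp [List.foldl, ih]

-- one track of B's loop computes A's count_flip
theorem foldl_step (l : List Int) (p c : Int) :
    (l.foldl pvStep (p, c)).2 = c + pvCountFlip l p := by
  induction l generalizing p c with
  | nil => simp [pvCountFlip]
  | cons x xs ih =>
    by_cases h : p = x
    · simp [List.foldl, pvStep, pvCountFlip, pvFlip, h, ih]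
      ring
    · simp [List.foldl, pvStep, pvCountFlip, h, ih]

-- ===== VERDICT (by name: the statement is the Claim_ definition above) =====
theorem solution_spec : Claim_equal_solution := by
  intro A _
  unfold Spec_solution solution solution_alt
  match A with
  | [] => rfl
  | [_] => rfl
  | a :: b :: rest =>
    simp only [List.length_cons, List.tail_cons, List.headD_cons]
    rw [if_neg (by omega)]
    simp only [foldl_pair, foldl_step]
    simp [pvFlip]
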